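-- pv_equiv track=rewrite | github.com/FJH92/Elementti | src/elementti.py | apply_manual_column_removal
-- ===== SOURCE A (Python) =====
-- from typing import Dict, List, Tuple, Optional
--
-- def apply_manual_column_removal(rows: List[List[str]], manual_columns: List[int]) -> List[List[str]]:
--     if not rows:
--         return rows
--
--     ncols = max(len(row) for row in rows)
--     if not manual_columns:
--         return rows
--
--     manual_set = set(manual_columns)
--     keep_indices = [j for j in range(ncols) if j not in manual_set]
--
--     if not keep_indices:
--         raise ValueError("All columns were removed. Please revise the columns to remove.")
--
--     new_rows = []
--     for row in rows:
--         padded = row + [""] * (ncols - len(row))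
--         new_rows.append([padded[j] for j in keep_indices])
--
--     return new_rows
-- ===== SOURCE B (Python) =====
-- def apply_manual_column_removal(rows, manual_columns):
--     if not rows or not manual_columns:
--         return rows
--
--     width = len(max(rows, key=len))
--
--     removed = sorted({idx for idx in manual_columns if 0 <= idx < width}, reverse=True)
--     if len(removed) == width:
--         raise ValueError("All columns were removed. Please revise the columns to remove.")
--
--     new_rows = []
--     for r in rows:
--         full = r + [""] * (width - len(r))
--         for idx in removed:
--             del full[idx]
--         new_rows.append(full)
--     return new_rows
-- ===== Notes on version B (the rewrite author's own statement) =====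
-- stated objective: alternative
-- what changed: B removes columns by repeatedly deleting positions from each padded row, walking the distinct in-range removed indices in descending sorted order, instead of A's selection of a precomputed keep-indices list.
-- outside the precondition, e.g. on apply_manual_column_removal([['a', 'b']], [0, 1]): A raises ValueError, B raises ValueError
import Mathlib
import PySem

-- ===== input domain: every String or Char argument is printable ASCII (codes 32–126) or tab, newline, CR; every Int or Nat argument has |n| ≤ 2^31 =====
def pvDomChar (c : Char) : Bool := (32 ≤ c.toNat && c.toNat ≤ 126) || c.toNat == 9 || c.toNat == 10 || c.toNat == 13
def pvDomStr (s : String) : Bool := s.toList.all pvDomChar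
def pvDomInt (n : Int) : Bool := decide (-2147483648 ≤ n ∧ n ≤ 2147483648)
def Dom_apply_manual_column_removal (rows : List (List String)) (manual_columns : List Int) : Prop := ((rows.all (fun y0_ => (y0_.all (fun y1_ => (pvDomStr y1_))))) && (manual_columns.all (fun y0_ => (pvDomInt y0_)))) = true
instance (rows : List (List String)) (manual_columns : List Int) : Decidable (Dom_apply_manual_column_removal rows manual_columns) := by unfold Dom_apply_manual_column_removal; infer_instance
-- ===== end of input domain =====

-- B deletes the removed columns from each padded row in descending sorted order (repeated del)
-- instead of A's selection through a precomputed keep-indices list; alternative decomposition, same result.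

-- ===== PORT A =====
def apply_manual_column_removal (rows : List (List String)) (manual_columns : List Int) : List (List String) :=
  if rows = [] then rows
  else
    let ncols : Int := (PySem.List.max? (rows.map (fun row => (row.length : Int))) (fun x => x)).getD 0
    if manual_columns = [] then rows
    else
      let manual_set : PySem.Set Int := PySem.Set.ofList manual_columns
      let keep_indices : List Int := (PySem.List.pyRange 0 ncols 1).filter (fun j => !(PySem.Set.contains manual_set j))
      if keep_indices = [] then []   -- Python raises ValueError here; excluded by Pre_
      else
        rows.map (fun row =>
          let padded := row ++ List.replicate (ncols - (row.length : Int)).toNat ""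
          keep_indices.map (fun j => PySem.List.pyGetD padded j ""))

-- ===== PORT B =====
def apply_manual_column_removal_alt (rows : List (List String)) (manual_columns : List Int) : List (List String) :=
  if rows = [] ∨ manual_columns = [] then rows
  else
    let width : Int := (((PySem.List.max? rows (fun rw_ => (rw_.length : Int))).getD []).length : Int)
    let removed : List Int :=
      PySem.List.sorted (PySem.Set.ofList (manual_columns.filter (fun idx => decide (0 ≤ idx) && decide (idx < width)))) (fun v => v) true
    if (removed.length : Int) = width then []   -- Python raises ValueError here; excluded by Pre_
    else
      rows.map (fun r =>
        let full := r ++ List.replicate (width - (r.length : Int)).toNat ""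
        -- 'del full[idx]' with 0 ≤ idx < len(full): exactly List.eraseIdx idx.toNat (indices here are in range)
        removed.foldl (fun acc idx => acc.eraseIdx idx.toNat) full)

-- ===== PRECONDITION & SPEC =====
-- Pre_ excludes exactly the inputs on which A raises ValueError ("All columns were removed"):
-- nonempty rows, nonempty manual_columns, and no column index 0..ncols-1 outside manual_columns
-- (B raises the same ValueError there).
def Pre_apply_manual_column_removal (rows : List (List String)) (manual_columns : List Int) : Prop :=
  rows = [] ∨ manual_columns = [] ∨
    ∃ j ∈ PySem.List.pyRange 0 ((PySem.List.max? (rows.map (fun row => (row.length : Int))) (fun x => x)).getD 0) 1,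
      j ∉ manual_columns
instance (rows : List (List String)) (manual_columns : List Int) : Decidable (Pre_apply_manual_column_removal rows manual_columns) := by unfold Pre_apply_manual_column_removal; infer_instance
def pvWitness_apply_manual_column_removal : List (List String) × List Int := ([["a", "b"], ["c"]], [0])
def Spec_apply_manual_column_removal (rows : List (List String)) (manual_columns : List Int) (out : List (List String)) : Prop := out = apply_manual_column_removal_alt rows manual_columns
instance (rows : List (List String)) (manual_columns : List Int) (out : List (List String)) : Decidable (Spec_apply_manual_column_removal rows manual_columns out) := by unfold Spec_apply_manual_column_removal; infer_instance

-- ===== CLAIM =====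
def Claim_equal_apply_manual_column_removal : Prop := ∀ (rows : List (List String)) (manual_columns : List Int), Dom_apply_manual_column_removal rows manual_columns → Pre_apply_manual_column_removal rows manual_columns → Spec_apply_manual_column_removal rows manual_columns (apply_manual_column_removal rows manual_columns)

-- ===== LEMMAS AND PROOFS =====

theorem pv_map_getD_range {α : Type} (d : α) (l : List α) :
    (List.range l.length).map (fun i => l.getD i d) = l := by
  apply List.ext_getElem
  · simp
  · intro k h1 h2
    simp [List.getElem?_eq_getElem h2]

theorem pv_foldl_eraseIdx_desc {α : Type} (d : α) (ds : List Nat) (l : List α)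
    (hp : ds.Pairwise (· > ·)) (hb : ∀ x ∈ ds, x < l.length) :
    ds.foldl (fun acc j => acc.eraseIdx j) l =
      ((List.range l.length).filter (fun i => !ds.contains i)).map (fun i => l.getD i d) := by
  induction ds generalizing l with
  | nil => simpa using (pv_map_getD_range d l).symm
  | cons d0 ds ih =>
    have hd0 : d0 < l.length := hb d0 List.mem_cons_self
    have hlt : ∀ x ∈ ds, x < d0 := fun x hx => (List.pairwise_cons.mp hp).1 x hx
    have hlen : (l.eraseIdx d0).length = l.length - 1 := by
      rw [List.length_eraseIdx_of_lt hd0]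
    rw [List.foldl_cons, ih (l.eraseIdx d0) (List.pairwise_cons.mp hp).2
      (fun x hx => by rw [hlen]; have := hlt x hx; omega)]
    rw [hlen]
    set m := l.length - 1 - d0 with hm
    have hL : List.range (l.length - 1) = List.range d0 ++ (List.range m).map (d0 + ·) := by
      rw [show l.length - 1 = d0 + m by omega, List.range_add]
    have hR : List.range l.length =
        (List.range d0 ++ [d0]) ++ (List.range m).map ((d0 + 1) + ·) := by
      rw [show l.length = (d0 + 1) + m by omega, List.range_add, List.range_succ]
    rw [hL, hR, List.filter_append, List.filter_append, List.filter_append,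
        show ([d0].filter (fun i => !(d0 :: ds).contains i)) = [] by simp,
        List.append_nil, List.map_append, List.map_append]
    congr 1
    · -- indices below d0: erasing at d0 does not move them, and d0 itself is not among them
      rw [List.filter_congr (p := fun i => !(d0 :: ds).contains i) (q := fun i => !ds.contains i)
          (fun i hi => by
            have : i < d0 := List.mem_range.mp hi
            simp [Nat.ne_of_lt this])]
      apply List.map_congr_left
      intro i hi
      have hid : i < d0 := List.mem_range.mp (List.mem_of_mem_filter hi)
      rw [List.getD_eq_getElem?_getD, List.getD_eq_getElem?_getD, List.getElem?_eraseIdx,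
          if_pos hid]
    · -- indices above d0: shifted down by one by the deletion; none of them is removed later
      have h1' : ∀ k ∈ List.range m, ((fun i => !ds.contains i) ∘ (fun x => d0 + x)) k = true := by
        intro k hk
        simpa using fun hmem => absurd (hlt _ hmem) (by omega)
      have h2' : ∀ k ∈ List.range m,
          ((fun i => !(d0 :: ds).contains i) ∘ (fun x => d0 + 1 + x)) k = true := by
        intro k hk
        simpa using ⟨by omega, fun hmem => absurd (hlt _ hmem) (by omega)⟩
      rw [List.filter_map, List.filter_map, List.filter_eq_self.mpr h1',
          List.filter_eq_self.mpr h2', List.map_map, List.map_map]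
      apply List.map_congr_left
      intro k hk
      simp only [Function.comp_apply]
      rw [List.getD_eq_getElem?_getD, List.getD_eq_getElem?_getD, List.getElem?_eraseIdx,
          if_neg (by omega), show d0 + k + 1 = d0 + 1 + k by omega]

theorem pv_ncols_eq (rows : List (List String)) (h : rows ≠ []) :
    ((((PySem.List.max? rows (fun r => (r.length : Int))).getD []).length : Nat) : Int)
      = (PySem.List.max? (rows.map (fun row => (row.length : Int))) (fun x => x)).getD 0 := by
  obtain ⟨r0, hr0⟩ : ∃ r0, PySem.List.max? rows (fun r => (r.length : Int)) = some r0 := by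
    rcases hmax : PySem.List.max? rows (fun r => (r.length : Int)) with _ | r0
    · exact absurd ((PySem.List.max?_eq_none_iff _ _).mp hmax) h
    · exact ⟨r0, rfl⟩
  obtain ⟨v, hv⟩ : ∃ v, PySem.List.max? (rows.map (fun row => (row.length : Int))) (fun x => x) = some v := by
    rcases hmax : PySem.List.max? (rows.map (fun row => (row.length : Int))) (fun x => x) with _ | v
    · exact absurd (List.map_eq_nil_iff.mp ((PySem.List.max?_eq_none_iff _ _).mp hmax)) h
    · exact ⟨v, hmax⟩
  rw [hr0, hv]
  simp only [Option.getD_some]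
  have h1 : ∀ y ∈ rows, (y.length : Int) ≤ (r0.length : Int) := PySem.List.max?_isMax hr0
  have h2 : ∀ y ∈ rows.map (fun row => (row.length : Int)), y ≤ v := PySem.List.max?_isMax hv
  obtain ⟨r1, hr1m, hr1⟩ := List.mem_map.mp (PySem.List.max?_mem hv)
  have hr0m := PySem.List.max?_mem hr0
  have := h1 r1 hr1m
  have := h2 (r0.length : Int) (List.mem_map.mpr ⟨r0, hr0m, rfl⟩)
  omega

theorem pv_len_le_ncols (rows : List (List String)) (row : List String) (hm : row ∈ rows) :
    (row.length : Int) ≤ (PySem.List.max? (rows.map (fun row => (row.length : Int))) (fun x => x)).getD 0 := by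
  rcases hmax : PySem.List.max? (rows.map (fun row => (row.length : Int))) (fun x => x) with _ | v
  · exact absurd (List.map_eq_nil_iff.mp ((PySem.List.max?_eq_none_iff _ _).mp hmax))
      (List.ne_nil_of_mem hm)
  · rw [hmax]
    simpa using PySem.List.max?_isMax hmax _ (List.mem_map.mpr ⟨row, hm, rfl⟩)

-- ===== VERDICT =====
theorem apply_manual_column_removal_spec : Claim_equal_apply_manual_column_removal := by
  intro rows mc _ hpre
  unfold Pre_apply_manual_column_removal at hpre
  unfold Spec_apply_manual_column_removal apply_manual_column_removal apply_manual_column_removal_alt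
  by_cases h1 : rows = []
  · simp [h1]
  by_cases h2 : mc = []
  · simp [h1, h2]
  rcases hpre with hpre | hpre | ⟨j0, hj0r, hj0m⟩
  · exact absurd hpre h1
  · exact absurd hpre h2
  simp only [if_neg h1, if_neg h2, if_neg (show ¬(rows = [] ∨ mc = []) by tauto)]
  rw [pv_ncols_eq rows h1]
  set n : Int := (PySem.List.max? (rows.map (fun row => (row.length : Int))) (fun x => x)).getD 0 with hn
  have hn0 : 0 ≤ n := by
    rw [hn, ← pv_ncols_eq rows h1]; positivity
  obtain ⟨hj00, hj0n⟩ := (PySem.List.mem_pyRange_one).mp hj0r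
  set removed : List Int :=
    PySem.List.sorted (PySem.Set.ofList (mc.filter (fun j => decide (0 ≤ j) && decide (j < n)))) (fun x => x) true with hrem
  have hmem : ∀ j, j ∈ removed ↔ j ∈ mc ∧ 0 ≤ j ∧ j < n := by
    intro j
    rw [hrem, PySem.List.mem_sorted, PySem.Set.mem_ofList, List.mem_filter]
    simp
  have hnd : removed.Nodup := by
    rw [hrem]
    exact (PySem.List.sorted_perm _ _ _).nodup_iff.mpr (PySem.Set.nodup_ofList _)
  have hdesc : removed.Pairwise (· > ·) := by
    have hge : removed.Pairwise (fun a b => b ≤ a) := by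
      rw [hrem]; exact PySem.List.sorted_pairwise_rev _ _
    exact (hge.and hnd).imp (fun h => lt_of_le_of_ne h.1 h.2.symm)
  -- A's guard: some column is kept
  have hkeepne :
      ((PySem.List.pyRange 0 n 1).filter
        (fun j => !(PySem.Set.contains (PySem.Set.ofList mc) j))) ≠ [] := by
    apply List.ne_nil_of_mem (a := j0)
    rw [List.mem_filter]
    refine ⟨hj0r, by simp [hj0m]⟩
  -- B's guard: not all columns removed
  have hcard : removed.length < n.toNat := by
    have hsub : removed.toFinset ⊆ (Finset.Ico (0:Int) n).erase j0 := by
      intro x hx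
      rw [List.mem_toFinset] at hx
      obtain ⟨hxm, hx0, hxn⟩ := (hmem x).mp hx
      refine Finset.mem_erase.mpr ⟨?_, Finset.mem_Ico.mpr ⟨hx0, hxn⟩⟩
      rintro rfl; exact hj0m hxm
    have hj0i : j0 ∈ Finset.Ico (0:Int) n := Finset.mem_Ico.mpr ⟨hj00, hj0n⟩
    have h3 := Finset.card_le_card hsub
    rw [Finset.card_erase_of_mem hj0i, Int.card_Ico] at h3
    rw [← List.toFinset_card_of_nodup hnd]
    have hpos : 0 < (n - 0).toNat := by omega
    omega
  have hBguard : ¬ ((removed.length : Int) = n) := by omega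
  rw [if_neg hkeepne, if_neg hBguard]
  apply List.map_congr_left
  intro row hrowm
  have hle : (row.length : Int) ≤ n := pv_len_le_ncols rows row hrowm
  set padded : List String := row ++ List.replicate (n - (row.length : Int)).toNat "" with hpad
  have hplen : padded.length = n.toNat := by
    rw [hpad]; simp; omega
  rw [← List.foldl_map (f := fun j : Int => j.toNat)
      (g := fun (acc : List String) j => acc.eraseIdx j)]
  set dsNat : List Nat := removed.map Int.toNat with hds
  have hdp : dsNat.Pairwise (· > ·) := by
    rw [hds, List.pairwise_map]
    refine hdesc.imp_of_mem ?_
    intro a b ha hb hab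
    have := ((hmem b).mp hb).2.1
    omega
  have hdb : ∀ x ∈ dsNat, x < padded.length := by
    intro x hx
    rw [hds, List.mem_map] at hx
    obtain ⟨j, hj, rfl⟩ := hx
    obtain ⟨-, hj0', hjn⟩ := (hmem j).mp hj
    rw [hplen]; omega
  rw [pv_foldl_eraseIdx_desc "" dsNat padded hdp hdb, hplen]
  rw [PySem.List.pyRange_one 0 n, List.filter_map, List.map_map]
  rw [show (n - 0).toNat = n.toNat by omega]
  rw [List.filter_congr (q := fun k => !dsNat.contains k) ?_]
  · apply List.map_congr_left
    intro k hk
    have hkn : k < n.toNat := List.mem_range.mp (List.mem_of_mem_filter hk)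
    simp only [Function.comp_apply, zero_add]
    rw [PySem.List.pyGetD_natCast]
  · intro k hk
    have hkn : k < n.toNat := List.mem_range.mp hk
    simp only [Function.comp_apply, zero_add]
    have hiff : ((k : Int) ∈ removed) ↔ (k : Int) ∈ mc := by
      rw [hmem]
      constructor
      · tauto
      · intro hm; exact ⟨hm, by omega, by omega⟩
    have hkds : dsNat.contains k = decide ((k : Int) ∈ mc) := by
      rw [hds]
      rw [List.contains_eq_mem]
      congr 1
      rw [eq_iff_iff, List.mem_map]
      constructor
      · rintro ⟨j, hj, hjk⟩
        have := ((hmem j).mp hj).2.1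
        have : j = (k : Int) := by omega
        exact hiff.mp (this ▸ hj)
      · intro hm
        exact ⟨(k : Int), hiff.mpr hm, by omega⟩
    rw [hkds]
    simp [PySem.Set.contains_eq_listContains, List.contains_eq_mem, PySem.Set.mem_ofList]
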